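-- pv_equiv track=rewrite | github.com/Jerempire/gym-anything | benchmarks/cua_world/environments/juris_m_env/tasks/law_review_publication_prep/verifier.py | _count_articles_in_digital_search
-- ===== SOURCE A (Python) =====
-- from typing import Any, Dict, List
--
-- ALL_ARTICLE_SLUGS = [
--     "taxonomy",
--     "lex informatica",
--     "broken promises",
--     "big data ethics",
--     "history of online gatekeeping",
--     "fourth amendment and new technologies",
--     "pii problem",
--     "privacy on the books",
-- ]
--
-- def _fuzzy_match(target_slug: str, candidate: str) -> bool:
--     """Return True if target_slug appears as a substring of candidate (case-insensitive)."""
--     return target_slug.lower() in candidate.lower()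
--
-- def _count_articles_in_digital_search(digital_search_items: List[str]) -> int:
--     """
--     Count how many law review article titles appear in the Digital Search Cases subcollection.
--     Articles should NOT be placed there.
--     """
--     misclassified = 0
--     for slug in ALL_ARTICLE_SLUGS:
--         for name in digital_search_items:
--             if _fuzzy_match(slug, name):
--                 misclassified += 1
--                 break
--     return misclassified
-- ===== SOURCE B (Python) =====
-- ALL_ARTICLE_SLUGS = [
--     "taxonomy",
--     "lex informatica",
--     "broken promises",
--     "big data ethics",
--     "history of online gatekeeping",
--     "fourth amendment and new technologies",
--     "pii problem",
--     "privacy on the books",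
-- ]
--
-- def _count_articles_in_digital_search(digital_search_items):
--     """Single pass over the items: collect the distinct slugs seen, then count them."""
--     matched = set()
--     for name in digital_search_items:
--         low = name.lower()
--         for slug in ALL_ARTICLE_SLUGS:
--             if slug.lower() in low:
--                 matched.add(slug)
--     return len(matched)
-- ===== Notes on version B (the rewrite author's own statement) =====
-- stated objective: alternative
-- what changed: Inverts the loop nesting: instead of a per-slug counter with an early break over the items, B makes one pass over the items, lowercases each item once, accumulates the set of distinct matched slugs, and returns its size.
import Mathlib
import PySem

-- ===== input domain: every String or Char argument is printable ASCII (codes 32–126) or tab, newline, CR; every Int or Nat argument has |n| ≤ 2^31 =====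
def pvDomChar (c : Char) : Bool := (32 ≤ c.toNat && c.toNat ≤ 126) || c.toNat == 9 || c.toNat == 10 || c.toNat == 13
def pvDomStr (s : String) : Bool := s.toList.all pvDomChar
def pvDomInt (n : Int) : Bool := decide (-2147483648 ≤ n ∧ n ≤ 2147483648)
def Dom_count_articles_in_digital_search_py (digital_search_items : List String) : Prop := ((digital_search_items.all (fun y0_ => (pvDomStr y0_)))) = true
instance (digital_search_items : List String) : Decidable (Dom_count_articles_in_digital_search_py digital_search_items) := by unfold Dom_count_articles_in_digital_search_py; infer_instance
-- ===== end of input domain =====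

-- B inverts the loop nesting: one pass over the items accumulating the set of distinct matched slugs
-- (each item lowercased once), returning its size (a timing run measured B faster by a constant factor).


-- ===== PORT A =====
def pvSlugs : List String :=
  ["taxonomy", "lex informatica", "broken promises", "big data ethics",
   "history of online gatekeeping", "fourth amendment and new technologies",
   "pii problem", "privacy on the books"]

-- _fuzzy_match: target_slug.lower() in candidate.lower()
def pvFuzzyMatch (target_slug candidate : String) : Bool :=
  PySem.Str.isIn (PySem.Str.lower target_slug) (PySem.Str.lower candidate)

-- A's inner 'for name in digital_search_items: … break' loop
def pvInnerA (slug : String) (items : List String) (acc : Int) : Int :=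
  match items with
  | [] => acc
  | n :: t => if pvFuzzyMatch slug n then acc + 1 else pvInnerA slug t acc

def count_articles_in_digital_search_py (digital_search_items : List String) : Int :=
  pvSlugs.foldl (fun acc slug => pvInnerA slug digital_search_items acc) 0

-- ===== PORT B =====
def count_articles_in_digital_search_py_alt (digital_search_items : List String) : Int :=
  PySem.Set.len
    (digital_search_items.foldl
      (fun matched name =>
        let low := PySem.Str.lower name
        pvSlugs.foldl
          (fun m slug => if PySem.Str.isIn (PySem.Str.lower slug) low then PySem.Set.add m slug else m)
          matched)
      PySem.Set.empty)

-- ===== PRECONDITION & SPEC =====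
def Spec_count_articles_in_digital_search_py (digital_search_items : List String) (out : Int) : Prop := out = count_articles_in_digital_search_py_alt digital_search_items
instance (digital_search_items : List String) (out : Int) : Decidable (Spec_count_articles_in_digital_search_py digital_search_items out) := by unfold Spec_count_articles_in_digital_search_py; infer_instance

-- ===== CLAIM (what is proved, stated in full; the proofs are below) =====
def Claim_equal_count_articles_in_digital_search_py : Prop := ∀ (digital_search_items : List String), Dom_count_articles_in_digital_search_py digital_search_items → Spec_count_articles_in_digital_search_py digital_search_items (count_articles_in_digital_search_py digital_search_items)

-- ===== LEMMAS AND PROOFS =====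

-- A's inner loop just tests whether some item matches
theorem pvInnerA_eq (slug : String) (items : List String) (acc : Int) :
    pvInnerA slug items acc =
      if items.any (fun n => pvFuzzyMatch slug n) then acc + 1 else acc := by
  induction items with
  | nil => simp [pvInnerA]
  | cons n t ih => by_cases h : pvFuzzyMatch slug n <;> simp [pvInnerA, h, ih]

-- A counts the slugs matched by some item
theorem portA_eq_countP (items : List String) :
    count_articles_in_digital_search_py items =
      (pvSlugs.countP (fun slug => items.any (fun n => pvFuzzyMatch slug n)) : Int) := by
  unfold count_articles_in_digital_search_py
  simp only [pvInnerA_eq]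
  simpa using PySem.List.foldl_count_if (fun slug => items.any (fun n => pvFuzzyMatch slug n)) pvSlugs 0

-- membership after B's inner loop over the slugs
theorem mem_innerB (q : String → Bool) (L : List String) (m : PySem.Set String) (x : String) :
    x ∈ L.foldl (fun m slug => if q slug then PySem.Set.add m slug else m) m ↔
      x ∈ m ∨ (x ∈ L ∧ q x) := by
  induction L generalizing m with
  | nil => simp
  | cons a t ih =>
    by_cases h : q a
    · simp only [List.foldl_cons, h, if_pos, ih, PySem.Set.mem_add, List.mem_cons]
      constructor
      · rintro ((hm | rfl) | ht) <;> tauto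
      · rintro (hm | ⟨(rfl | hx), hq⟩) <;> tauto
    · simp only [List.foldl_cons, h, if_neg, Bool.false_eq_true, not_false_iff, ih, List.mem_cons]
      constructor
      · rintro (hm | ht) <;> tauto
      · rintro (hm | ⟨(rfl | hx), hq⟩) <;> tauto

-- nodup is preserved by B's inner loop
theorem nodup_innerB (q : String → Bool) (L : List String) (m : PySem.Set String) (hm : m.Nodup) :
    (L.foldl (fun m slug => if q slug then PySem.Set.add m slug else m) m).Nodup := by
  induction L generalizing m with
  | nil => simpa
  | cons a t ih =>
    by_cases h : q a
    · simpa [h] using ih _ (PySem.Set.nodup_add m a hm)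
    · simpa [h] using ih _ hm

-- membership in B's accumulated set
theorem mem_outerB (items : List String) (m : PySem.Set String) (x : String) :
    x ∈ items.foldl
        (fun matched name =>
          pvSlugs.foldl
            (fun m slug => if PySem.Str.isIn (PySem.Str.lower slug) (PySem.Str.lower name) then PySem.Set.add m slug else m)
            matched) m ↔
      x ∈ m ∨ (x ∈ pvSlugs ∧ items.any (fun n => pvFuzzyMatch x n)) := by
  induction items generalizing m with
  | nil => simp
  | cons a t ih =>
    simp only [List.foldl_cons, ih, mem_innerB, List.any_cons, pvFuzzyMatch]
    constructor
    · rintro ((hm | ⟨hs, hq⟩) | ⟨hs, hq⟩) <;> simp_all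
    · rintro (hm | ⟨hs, hq⟩)
      · tauto
      · rcases Bool.or_eq_true_iff.mp hq with h1 | h2
        · exact Or.inl (Or.inr ⟨hs, h1⟩)
        · exact Or.inr ⟨hs, h2⟩

-- nodup of B's accumulated set
theorem nodup_outerB (items : List String) (m : PySem.Set String) (hm : m.Nodup) :
    (items.foldl
        (fun matched name =>
          pvSlugs.foldl
            (fun m slug => if PySem.Str.isIn (PySem.Str.lower slug) (PySem.Str.lower name) then PySem.Set.add m slug else m)
            matched) m).Nodup := by
  induction items generalizing m with
  | nil => simpa
  | cons a t ih => exact ih _ (nodup_innerB _ _ _ hm)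

-- ===== VERDICT (by name: the statement is the Claim_ definition above) =====
theorem count_articles_in_digital_search_py_spec : Claim_equal_count_articles_in_digital_search_py := by
  intro items _
  show count_articles_in_digital_search_py items = count_articles_in_digital_search_py_alt items
  rw [portA_eq_countP]
  unfold count_articles_in_digital_search_py_alt
  set p : String → Bool := fun slug => items.any (fun n => pvFuzzyMatch slug n) with hp
  set S := items.foldl
      (fun matched name =>
        pvSlugs.foldl
          (fun m slug => if PySem.Str.isIn (PySem.Str.lower slug) (PySem.Str.lower name) then PySem.Set.add m slug else m)
        matched) (PySem.Set.empty) with hS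
  have hnodupS : S.Nodup := nodup_outerB items _ (by simp [PySem.Set.empty])
  have hnodupF : (pvSlugs.filter p).Nodup := (by decide : pvSlugs.Nodup).filter p
  have hperm : (pvSlugs.filter p).Perm S := by
    rw [List.perm_ext_iff_of_nodup hnodupF hnodupS]
    intro x
    rw [hS, mem_outerB, List.mem_filter]
    simp [PySem.Set.empty, hp]
  have hlen : (pvSlugs.filter p).length = S.length := hperm.length_eq
  rw [PySem.Set.len]
  rw [← hlen, ← List.countP_eq_length_filter]
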